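-- pv_equiv track=rewrite | github.com/computerphilosopher/intelliquant | lineplus2020/2.py | solution
-- ===== SOURCE A (Python) =====
-- def is_suspect(answer, sheet1, sheet2):
--     return sheet1 != answer and sheet1 == sheet2
--
-- def solution(answer_sheet, sheets):
--
--     ret = 0
--
--     for i in range(len(sheets)):
--         for j in range(i+1, len(sheets)):
--             suspect_cnt = 0
--             cur_combo = 0
--             max_combo = 0
--             for k in range(len(answer_sheet)):
--                 if is_suspect(answer_sheet[k], sheets[i][k], sheets[j][k]):
--                     suspect_cnt += 1
--                     cur_combo += 1
--                     max_combo = max(max_combo, cur_combo)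
--                 else:
--                     cur_combo = 0
--             ret = max(ret, suspect_cnt + (max_combo ** 2))
--
--     return ret
-- ===== SOURCE B (Python) =====
-- def longest_run(mask):
--     # length of the longest consecutive run of True, by structural recursion
--     if not mask:
--         return 0
--     if not mask[0]:
--         return longest_run(mask[1:])
--     run = 1
--     while run < len(mask) and mask[run]:
--         run += 1
--     return max(run, longest_run(mask[run:]))
--
--
-- def solution(answer_sheet, sheets):
--     best = 0
--     for i, si in enumerate(sheets):
--         for sj in sheets[i + 1:]:
--             mask = [answer_sheet[k] != si[k] and si[k] == sj[k]
--                     for k in range(len(answer_sheet))]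
--             cnt = sum(mask)
--             combo = longest_run(mask)
--             best = max(best, cnt + combo * combo)
--     return best
-- ===== Notes on version B (the rewrite author's own statement) =====
-- stated objective: alternative
-- what changed: The inline three-counter run tracker is replaced by a two-phase decomposition per pair: build the suspect mask once, count it with sum, and compute the longest True run by structural recursion on the mask; pairs are drawn with enumerate/slices instead of index arithmetic.
import Mathlib
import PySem

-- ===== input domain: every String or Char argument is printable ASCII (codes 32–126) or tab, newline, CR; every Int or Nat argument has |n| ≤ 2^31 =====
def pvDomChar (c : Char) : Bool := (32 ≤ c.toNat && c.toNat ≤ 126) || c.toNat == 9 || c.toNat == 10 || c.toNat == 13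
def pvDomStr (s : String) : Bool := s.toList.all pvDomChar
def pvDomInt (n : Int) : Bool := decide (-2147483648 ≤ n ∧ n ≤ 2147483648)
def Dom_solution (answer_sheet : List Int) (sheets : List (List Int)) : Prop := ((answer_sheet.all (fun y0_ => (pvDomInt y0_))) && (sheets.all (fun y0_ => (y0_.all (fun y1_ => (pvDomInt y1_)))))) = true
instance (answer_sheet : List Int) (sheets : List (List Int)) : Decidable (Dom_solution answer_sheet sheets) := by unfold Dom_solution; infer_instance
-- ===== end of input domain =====

-- B replaces A's inline three-counter run tracker by a per-pair mask + recursive longest-run helper (alternative decomposition, same cost).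


-- ===== PORT A =====
def is_suspect (answer sheet1 sheet2 : Int) : Bool :=
  sheet1 != answer && sheet1 == sheet2

-- literal transliteration of A; indexing uses PySem.List.pyGetD (exact under Pre_, which
-- excludes exactly the IndexError inputs)
def solution (answer_sheet : List Int) (sheets : List (List Int)) : Int :=
  (PySem.List.pyRange 0 (PySem.List.len sheets) 1).foldl (fun ret i =>
    (PySem.List.pyRange (i + 1) (PySem.List.len sheets) 1).foldl (fun ret j =>
      let s := (PySem.List.pyRange 0 (PySem.List.len answer_sheet) 1).foldl
        (fun (st : Int × Int × Int) k =>
          if is_suspect (PySem.List.pyGetD answer_sheet k 0)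
              (PySem.List.pyGetD (PySem.List.pyGetD sheets i []) k 0)
              (PySem.List.pyGetD (PySem.List.pyGetD sheets j []) k 0) then
            (st.1 + 1, st.2.1 + 1, max st.2.2 (st.2.1 + 1))
          else
            (st.1, 0, st.2.2)) (0, 0, 0)
      max ret (s.1 + s.2.2 ^ 2)) ret) 0

-- ===== PORT B =====
-- longest_run from Source B: structural recursion on the mask
def longestRun : List Bool → Nat
  | [] => 0
  | false :: t => longestRun t
  | true :: t =>
    max (1 + (t.takeWhile id).length) (longestRun (t.drop (t.takeWhile id).length))
termination_by l => l.length
decreasing_by all_goals (simp; try omega)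

def solution_alt (answer_sheet : List Int) (sheets : List (List Int)) : Int :=
  (PySem.List.enumerate sheets).foldl (fun best (p : Int × List Int) =>
    (PySem.List.slice sheets (some (p.1 + 1)) none).foldl (fun best sj =>
      let mask := (PySem.List.pyRange 0 (PySem.List.len answer_sheet) 1).map (fun k =>
        (PySem.List.pyGetD answer_sheet k 0 != PySem.List.pyGetD p.2 k 0) &&
        (PySem.List.pyGetD p.2 k 0 == PySem.List.pyGetD sj k 0))
      let cnt : Int := (mask.count true : Nat)
      let combo := longestRun mask
      max best (cnt + (combo : Int) * (combo : Int))) best) 0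

-- ===== PRECONDITION & SPEC =====
-- A raises IndexError when two or more sheets exist and some sheet is shorter than
-- answer_sheet; Pre_ excludes exactly those inputs.
def Pre_solution (answer_sheet : List Int) (sheets : List (List Int)) : Prop :=
  sheets.length ≤ 1 ∨ ∀ s ∈ sheets, answer_sheet.length ≤ s.length
instance (answer_sheet : List Int) (sheets : List (List Int)) : Decidable (Pre_solution answer_sheet sheets) := by unfold Pre_solution; infer_instance

def pvWitness_solution : List Int × List (List Int) := ([1, 2], [[1, 1], [1, 1], [2, 2]])

def Spec_solution (answer_sheet : List Int) (sheets : List (List Int)) (out : Int) : Prop := out = solution_alt answer_sheet sheets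
instance (answer_sheet : List Int) (sheets : List (List Int)) (out : Int) : Decidable (Spec_solution answer_sheet sheets out) := by unfold Spec_solution; infer_instance

-- ===== CLAIM (what is proved, stated in full; the proofs are below) =====
def Claim_equal_solution : Prop := ∀ (answer_sheet : List Int) (sheets : List (List Int)), Dom_solution answer_sheet sheets → Pre_solution answer_sheet sheets → Spec_solution answer_sheet sheets (solution answer_sheet sheets)

-- ===== LEMMAS AND PROOFS =====

-- A's inner-loop step, over the boolean mask value
def stepA (st : Int × Int × Int) (b : Bool) : Int × Int × Int :=
  if b then (st.1 + 1, st.2.1 + 1, max st.2.2 (st.2.1 + 1)) else (st.1, 0, st.2.2)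

-- final value of cur_combo after folding over bs
def finCur : List Bool → Nat → Nat
  | [], cur => cur
  | true :: t, cur => finCur t (cur + 1)
  | false :: t, _ => finCur t 0

-- final value of max_combo contributed by bs starting with cur_combo = cur
def rAux : List Bool → Nat → Nat
  | [], _ => 0
  | true :: t, cur => max (cur + 1) (rAux t (cur + 1))
  | false :: t, _ => rAux t 0

lemma foldA_char (bs : List Bool) (c u b : Nat) :
    bs.foldl stepA ((c : Int), (u : Int), (b : Int)) =
      (((c + bs.count true : Nat) : Int), ((finCur bs u : Nat) : Int), ((max b (rAux bs u) : Nat) : Int)) := by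
  induction bs generalizing c u b with
  | nil => simp [rAux, finCur]
  | cons hd t ih =>
    cases hd with
    | true =>
      have h1 : stepA ((c : Int), (u : Int), (b : Int)) true
          = (((c + 1 : Nat) : Int), ((u + 1 : Nat) : Int), ((max b (u + 1) : Nat) : Int)) := by
        simp [stepA]
      rw [List.foldl_cons, h1, ih]
      simp only [Prod.mk.injEq, List.count_cons, finCur, rAux]
      push_cast
      simp only [BEq.rfl, if_true, true_and]
      constructor
      · omega
      · omega
    | false =>
      have h1 : stepA ((c : Int), (u : Int), (b : Int)) false
          = ((c : Int), ((0 : Nat) : Int), (b : Int)) := by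
        simp [stepA]
      rw [List.foldl_cons, h1, ih]
      simp only [Prod.mk.injEq, List.count_cons, finCur, rAux]
      push_cast
      simp

-- rAux with arbitrary starting combo, characterised by longestRun
lemma rAux_formula (bs : List Bool) (cur : Nat) :
    rAux bs cur = match bs with
      | true :: t => max (cur + 1 + (t.takeWhile id).length)
          (longestRun (t.drop (t.takeWhile id).length))
      | _ => longestRun bs := by
  match bs with
  | [] => simp [rAux, longestRun]
  | false :: t =>
    show rAux t 0 = longestRun (false :: t)
    rw [rAux_formula t 0]
    match t with
    | [] => simp [longestRun]
    | true :: t' => simp [longestRun]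
    | false :: t' => simp [longestRun]
  | true :: t =>
    show max (cur + 1) (rAux t (cur + 1)) = _
    match t with
    | [] => simp [rAux, longestRun, List.takeWhile]
    | true :: t' =>
      rw [rAux_formula (true :: t') (cur + 1)]
      simp only [List.takeWhile, id, List.length_cons, List.drop_succ_cons]
      have : cur + 1 ≤ cur + 1 + 1 + (t'.takeWhile id).length := by omega
      simp only [show cur + 1 + 1 + (t'.takeWhile id).length
          = cur + 1 + (1 + (t'.takeWhile id).length) by omega] at *
      omega
    | false :: t' =>
      show max (cur + 1) (rAux t' 0) = _
      rw [rAux_formula t' 0]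
      have ht' : (match t' with
          | true :: t'' => max (0 + 1 + (t''.takeWhile id).length)
              (longestRun (t''.drop ((t''.takeWhile id)).length))
          | _ => longestRun t') = longestRun t' := by
        match t' with
        | [] => simp
        | true :: t'' => simp [longestRun]
        | false :: t'' => simp
      rw [ht']
      simp [List.takeWhile, longestRun]
termination_by bs.length
decreasing_by all_goals (simp; try omega)

lemma rAux_zero (bs : List Bool) : rAux bs 0 = longestRun bs := by
  rw [rAux_formula]
  match bs with
  | [] => rfl
  | true :: t => simp [longestRun]
  | false :: t => rfl

-- per-pair equality: A's three-counter fold result equals B's count + longestRun²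
lemma pair_eq (mask : List Bool) :
    (mask.foldl stepA ((0 : Int), (0 : Int), (0 : Int))).1
      + (mask.foldl stepA ((0 : Int), (0 : Int), (0 : Int))).2.2 ^ 2
    = ((mask.count true : Nat) : Int) + (longestRun mask : Int) * (longestRun mask : Int) := by
  have h := foldA_char mask 0 0 0
  simp only [Nat.cast_zero] at h
  rw [h]
  simp [rAux_zero, sq]

-- enumerate = indices paired with getD lookups
lemma enumerate_eq_map_range (sheets : List (List Int)) :
    PySem.List.enumerate sheets =
      (PySem.List.pyRange 0 (PySem.List.len sheets) 1).map
        (fun i => (i, PySem.List.pyGetD sheets i ([] : List Int))) := by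
  apply List.ext_getElem
  · simp [PySem.List.length_enumerate, PySem.List.length_pyRange_one, PySem.List.len]
  · intro k h1 h2
    have hk : k < sheets.length := by
      simpa [PySem.List.length_enumerate] using h1
    rw [PySem.List.getElem_enumerate]
    rw [List.getElem_map, PySem.List.getElem_pyRange_one]
    simp only [zero_add]
    rw [PySem.List.pyGetD_natCast]
    simp [List.getD, hk]

-- ===== VERDICT (by name: the statement is the Claim_ definition above) =====
theorem solution_spec : Claim_equal_solution := by
  intro answer_sheet sheets _ _
  show solution answer_sheet sheets = solution_alt answer_sheet sheets
  unfold solution solution_alt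
  rw [enumerate_eq_map_range, List.foldl_map]
  apply PySem.List.foldl_congr_mem
  intro ret i hi
  have hi' : 0 ≤ i ∧ i < (sheets.length : Int) := by
    simpa [PySem.List.mem_pyRange_one, PySem.List.len] using hi
  rw [PySem.List.slice_from _ (by omega : (0:Int) ≤ i + 1)]
  rw [← PySem.List.map_pyGetD_pyRange sheets ([] : List Int) (a := i + 1) (by omega)]
  rw [List.foldl_map]
  apply PySem.List.foldl_congr_mem
  intro ret2 j _
  have hmask : ∀ k : Int,
      is_suspect (PySem.List.pyGetD answer_sheet k 0)
        (PySem.List.pyGetD (PySem.List.pyGetD sheets i []) k 0)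
        (PySem.List.pyGetD (PySem.List.pyGetD sheets j []) k 0)
      = ((PySem.List.pyGetD answer_sheet k 0 != PySem.List.pyGetD (PySem.List.pyGetD sheets i []) k 0) &&
        (PySem.List.pyGetD (PySem.List.pyGetD sheets i []) k 0 == PySem.List.pyGetD (PySem.List.pyGetD sheets j []) k 0)) := by
    intro k
    simp [is_suspect, bne, Bool.beq_comm]
  have hfold : (PySem.List.pyRange 0 (PySem.List.len answer_sheet) 1).foldl
      (fun (st : Int × Int × Int) k =>
        if is_suspect (PySem.List.pyGetD answer_sheet k 0)
            (PySem.List.pyGetD (PySem.List.pyGetD sheets i []) k 0)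
            (PySem.List.pyGetD (PySem.List.pyGetD sheets j []) k 0) then
          (st.1 + 1, st.2.1 + 1, max st.2.2 (st.2.1 + 1))
        else (st.1, 0, st.2.2)) ((0 : Int), (0 : Int), (0 : Int))
      = ((PySem.List.pyRange 0 (PySem.List.len answer_sheet) 1).map
          (fun k => (PySem.List.pyGetD answer_sheet k 0 != PySem.List.pyGetD (PySem.List.pyGetD sheets i []) k 0) &&
            (PySem.List.pyGetD (PySem.List.pyGetD sheets i []) k 0 == PySem.List.pyGetD (PySem.List.pyGetD sheets j []) k 0))).foldl
          stepA ((0 : Int), (0 : Int), (0 : Int)) := by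
    rw [List.foldl_map]
    apply PySem.List.foldl_congr_mem
    intro st k _
    rw [stepA, hmask k]
  rw [hfold]
  dsimp only
  rw [pair_eq]
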